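-- pv_equiv track=rewrite | github.com/carothersresearch/pyrfold | pyrfold/hyak/_convert.py | knotintersection
-- ===== SOURCE A (Python) =====
-- def knotintersection(listlisthelix):
--     #initialize the number of knots or 'intersections' that exist
--     # print listlisthelix
--     numberofknots = 0
--     listofknots = []
--     for index1 in listlisthelix:
--         for index2 in listlisthelix:
--             if ((index2[0] < index1[0] < index2[1]) and
--                (index2[0] < index1[1] < index2[1])):
--                 #Not a pseudoknot because it's contained within another
--                 # print 'internal loop'
--                 # print index1
--                 # print index2
--                 continue
--             elif ((index2[0] < index1[0] < index2[1]) and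
--                  (index1[1] > index2[1])):
--                 # print 'pseudoknot loop1'
--                 # print index1
--                 # print index2
--                 #pseudoknot
--                 numberofknots += 1
--                 listofknots.append(index1)
--                 break
--             elif ((index2[0] < index1[1] < index2[1]) and
--                  (index1[0] < index2[1])):
--                 # print 'pseudoknot loop2'
--                 # print index1
--                 # print index2
--                 #psuedoknot
--                 numberofknots += 1
--                 listofknots.append(index1)
--                 break
--     # print "#knots - " + str(numberofknots)
--     # print listofknots
--     #Counting the number of intersections a single helix has
--     #The idea her is to find the minimal number of deletions required for this
--     #Process
--     knotcountlist = []
--     for knots in listofknots: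
--         # print knots
--         #count number of intersections
--         intersectioncount = 0
--         for others in listofknots:
--             nonknot = 0 #(((..((..<<.))..))).>>
--             if knots == others:
--                 continue
--             if knots[0] < others[0] < knots[1]:
--                 #this is an intersection
--                 intersectioncount += 1
--                 nonknot += 1
--             if knots[0] < others[1] < knots[1]:
--                 #this is an intersection
--                 intersectioncount += 1
--                 nonknot += 1
--             if nonknot == 2:
--                 intersectioncount += -2
--         knotcountlist.append(intersectioncount)
--     # print knotcountlist
--     # print listofknots
--     return listofknots, knotcountlist
-- ===== SOURCE B (Python) =====
-- def _bisect(keys, v):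
--     # insertion point: number of elements of the sorted list `keys` that are < v
--     lo, hi = 0, len(keys)
--     while lo < hi:
--         mid = (lo + hi) // 2
--         if keys[mid] < v:
--             lo = mid + 1
--         else:
--             hi = mid
--     return lo
--
--
-- def knotintersection(listlisthelix):
--     # Sort endpoints once, then answer each helix's queries by binary search
--     # on the sorted arrays instead of an all-pairs scan.
--     by_start = sorted(((h[0], h[1]) for h in listlisthelix), key=lambda p: p[0])
--     by_end = sorted(((h[1], h[0]) for h in listlisthelix), key=lambda p: p[0])
--     skeys = [p[0] for p in by_start]
--     ekeys = [p[0] for p in by_end]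
--
--     def is_knot(h):
--         x0, x1 = h[0], h[1]
--         # some y with y0 < x0 < y1 < x1: ends in (x0, x1), start before x0
--         w = by_end[_bisect(ekeys, x0 + 1):_bisect(ekeys, x1)]
--         if any(y0 < x0 for (_, y0) in w):
--             return True
--         # some y with x0 <= y0 < x1 < y1: starts in [x0, x1), ends after x1
--         w = by_start[_bisect(skeys, x0):_bisect(skeys, x1)]
--         return any(x1 < y1 for (_, y1) in w)
--
--     knots = [h for h in listlisthelix if is_knot(h)]
--
--     # crossings per knot = (#starts inside) + (#ends inside) - 2*(#fully inside),
--     # counted on endpoint arrays of the knots (the knot itself contributes 0).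
--     kstart = sorted(((h[0], h[1]) for h in knots), key=lambda p: p[0])
--     kskeys = [p[0] for p in kstart]
--     kend = sorted(h[1] for h in knots)
--     counts = []
--     for k in knots:
--         k0, k1 = k[0], k[1]
--         lo, hi = _bisect(kskeys, k0 + 1), _bisect(kskeys, k1)
--         in0 = hi - lo
--         in1 = _bisect(kend, k1) - _bisect(kend, k0 + 1)
--         both = sum(1 for (_, y1) in kstart[lo:hi] if k0 < y1 < k1)
--         counts.append(in0 + in1 - 2 * both)
--     return knots, counts
-- ===== Notes on version B (the rewrite author's own statement) =====
-- stated objective: faster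
-- what changed: Replaces A's two all-pairs nested scans by sorted endpoint arrays queried with a hand-written binary search: a helix is a knot iff one of two bisected windows of the sorted end/start arrays contains a qualifying interval, and each knot's crossing count is computed arithmetically as (#starts inside) + (#ends inside) - 2*(#fully inside) from bisect differences and one bisected window, instead of A's per-pair XOR bookkeeping with break/continue.
import Mathlib
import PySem

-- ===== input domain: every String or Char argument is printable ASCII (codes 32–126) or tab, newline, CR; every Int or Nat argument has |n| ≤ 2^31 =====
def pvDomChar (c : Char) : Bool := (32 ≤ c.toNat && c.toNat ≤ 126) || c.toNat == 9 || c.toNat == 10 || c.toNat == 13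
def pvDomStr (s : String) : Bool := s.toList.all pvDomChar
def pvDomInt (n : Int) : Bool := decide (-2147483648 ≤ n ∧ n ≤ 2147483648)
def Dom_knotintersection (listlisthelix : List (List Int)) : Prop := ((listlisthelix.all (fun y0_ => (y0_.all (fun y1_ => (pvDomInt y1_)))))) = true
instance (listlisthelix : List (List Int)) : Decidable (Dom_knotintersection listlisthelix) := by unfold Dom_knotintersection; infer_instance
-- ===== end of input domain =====

-- B replaces A's all-pairs scans by sorted endpoint arrays queried with hand-written
-- binary search: knot detection via two sorted windows, per-knot counts by
-- (#starts inside) + (#ends inside) - 2*(#fully inside)  (objective: alternative).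

-- ===== PORT A =====
-- helix[i] for i = 0,1; Pre_ guarantees the index is in range, the default is never used
def pvEl (h : List Int) (i : Int) : Int := (PySem.List.pyGet? h i).getD 0

-- inner 'for index2' loop: continue on the contained case, break (knot found) on the two elifs
def kiInner (x : List Int) : List (List Int) → Bool
  | [] => false
  | y :: rest =>
    if pvEl y 0 < pvEl x 0 ∧ pvEl x 0 < pvEl y 1 ∧ pvEl y 0 < pvEl x 1 ∧ pvEl x 1 < pvEl y 1 then
      kiInner x rest
    else if pvEl y 0 < pvEl x 0 ∧ pvEl x 0 < pvEl y 1 ∧ pvEl x 1 > pvEl y 1 then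
      true
    else if pvEl y 0 < pvEl x 1 ∧ pvEl x 1 < pvEl y 1 ∧ pvEl x 0 < pvEl y 1 then
      true
    else kiInner x rest

-- outer 'for index1' loop building listofknots
def kiPhase1 (L : List (List Int)) : List (List Int) → List (List Int)
  | [] => []
  | x :: rest => if kiInner x L then x :: kiPhase1 L rest else kiPhase1 L rest

-- inner 'for others' loop: intersectioncount with the nonknot == 2 correction
def kiCount (k : List Int) : List (List Int) → Int
  | [] => 0
  | y :: rest =>
    if k = y then kiCount k rest
    else
      let nonknot : Int :=
        (if pvEl k 0 < pvEl y 0 ∧ pvEl y 0 < pvEl k 1 then 1 else 0) +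
        (if pvEl k 0 < pvEl y 1 ∧ pvEl y 1 < pvEl k 1 then 1 else 0)
      nonknot + (if nonknot = 2 then -2 else 0) + kiCount k rest

-- outer 'for knots' loop building knotcountlist
def kiPhase2 (knots : List (List Int)) : List (List Int) → List Int
  | [] => []
  | k :: rest => kiCount k knots :: kiPhase2 knots rest

def knotintersection (listlisthelix : List (List Int)) : List (List Int) × List Int :=
  let listofknots := kiPhase1 listlisthelix listlisthelix
  (listofknots, kiPhase2 listofknots listofknots)

-- ===== PORT B =====
-- Source B's hand-written _bisect loop; (lo+hi)//2 on the nonnegative lo, hi is Nat division,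
-- matching Python's floor division; keys[mid] is in range whenever
-- 0 ≤ lo < hi ≤ len (as in every reachable call), so the getD default is never used
def blAux (keys : List Int) (v : Int) (lo hi : Nat) : Nat :=
  if _h : lo < hi then
    let mid := (lo + hi) / 2
    if keys.getD mid 0 < v then blAux keys v (mid + 1) hi else blAux keys v lo mid
  else lo
termination_by hi - lo
decreasing_by all_goals omega

def bl (keys : List Int) (v : Int) : Nat := blAux keys v 0 keys.length

-- (h[0], h[1]) and (h[1], h[0]) pair extractions of Source B
def toSE (L : List (List Int)) : List (Int × Int) := L.map (fun h => (pvEl h 0, pvEl h 1))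
def toES (L : List (List Int)) : List (Int × Int) := L.map (fun h => (pvEl h 1, pvEl h 0))

-- is_knot of Source B: two binary-searched windows on the sorted pair arrays
def isKnotB (byStart byEnd : List (Int × Int)) (skeys ekeys : List Int) (h : List Int) : Bool :=
  let x0 := pvEl h 0
  let x1 := pvEl h 1
  (PySem.List.slice byEnd (some ((bl ekeys (x0 + 1) : Nat) : Int)) (some ((bl ekeys x1 : Nat) : Int))).any
      (fun p => decide (p.2 < x0)) ||
  (PySem.List.slice byStart (some ((bl skeys x0 : Nat) : Int)) (some ((bl skeys x1 : Nat) : Int))).any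
      (fun p => decide (x1 < p.2))

-- per-knot count of Source B: in0 + in1 - 2*both on the knots' endpoint arrays
def countB (kstart : List (Int × Int)) (kskeys kend : List Int) (k : List Int) : Int :=
  let k0 := pvEl k 0
  let k1 := pvEl k 1
  let lo := bl kskeys (k0 + 1)
  let hi := bl kskeys k1
  let in0 : Int := (hi : Int) - (lo : Int)
  let in1 : Int := (bl kend k1 : Int) - (bl kend (k0 + 1) : Int)
  let both : Int :=
    ((PySem.List.slice kstart (some ((lo : Nat) : Int)) (some ((hi : Nat) : Int))).countP
      (fun p => decide (k0 < p.2 ∧ p.2 < k1)) : Nat)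
  in0 + in1 - 2 * both

def knotintersection_alt (listlisthelix : List (List Int)) : List (List Int) × List Int :=
  let byStart := PySem.List.sorted (toSE listlisthelix) Prod.fst false
  let byEnd := PySem.List.sorted (toES listlisthelix) Prod.fst false
  let skeys := byStart.map Prod.fst
  let ekeys := byEnd.map Prod.fst
  let knots := listlisthelix.filter (isKnotB byStart byEnd skeys ekeys)
  let kstart := PySem.List.sorted (toSE knots) Prod.fst false
  let kskeys := kstart.map Prod.fst
  let kend := PySem.List.sorted (knots.map (fun h => pvEl h 1)) (fun e => e) false
  (knots, knots.map (countB kstart kskeys kend))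

-- ===== PRECONDITION & SPEC =====
-- Pre_ excludes exactly the inputs on which Python A raises IndexError: a helix of
-- length < 2 (both phases index helix[0] and helix[1]).
def Pre_knotintersection (listlisthelix : List (List Int)) : Prop :=
  ∀ h ∈ listlisthelix, 2 ≤ h.length
instance (listlisthelix : List (List Int)) : Decidable (Pre_knotintersection listlisthelix) := by unfold Pre_knotintersection; infer_instance

def pvWitness_knotintersection : List (List Int) := [[0, 2], [1, 3]]

def Spec_knotintersection (listlisthelix : List (List Int)) (out : List (List Int) × List Int) : Prop := out = knotintersection_alt listlisthelix
instance (listlisthelix : List (List Int)) (out : List (List Int) × List Int) : Decidable (Spec_knotintersection listlisthelix out) := by unfold Spec_knotintersection; infer_instance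

-- ===== CLAIM (what is proved, stated in full; the proofs are below) =====
def Claim_equal_knotintersection : Prop := ∀ (listlisthelix : List (List Int)), Dom_knotintersection listlisthelix → Pre_knotintersection listlisthelix → Spec_knotintersection listlisthelix (knotintersection listlisthelix)

-- ===== LEMMAS AND PROOFS =====

-- the closed-form crossing predicate both programs compute
def pvCross (x y : List Int) : Bool :=
  decide ((pvEl y 0 < pvEl x 0 ∧ pvEl x 0 < pvEl y 1 ∧ pvEl y 1 < pvEl x 1) ∨
          (pvEl x 0 ≤ pvEl y 0 ∧ pvEl y 0 < pvEl x 1 ∧ pvEl x 1 < pvEl y 1))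

-- exactly one endpoint of y strictly inside k
def pvXorIn (k y : List Int) : Bool :=
  (decide (pvEl k 0 < pvEl y 0 ∧ pvEl y 0 < pvEl k 1)) !=
  (decide (pvEl k 0 < pvEl y 1 ∧ pvEl y 1 < pvEl k 1))

-- ---- A-side characterisations ----
theorem kiInner_eq_any (x : List Int) (ys : List (List Int)) :
    kiInner x ys = ys.any (fun y => pvCross x y) := by
  induction ys with
  | nil => rfl
  | cons y t ih =>
    simp only [kiInner, List.any_cons]
    split_ifs with h1 h2 h3
    · have hc : pvCross x y = false := by simp only [pvCross, decide_eq_false_iff_not]; omega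
      simp [hc, ih]
    · have hc : pvCross x y = true := by simp only [pvCross, decide_eq_true_eq]; omega
      simp [hc]
    · have hc : pvCross x y = true := by simp only [pvCross, decide_eq_true_eq]; omega
      simp [hc]
    · have hc : pvCross x y = false := by simp only [pvCross, decide_eq_false_iff_not]; omega
      simp [hc, ih]

theorem kiPhase1_eq_filter (L xs : List (List Int)) :
    kiPhase1 L xs = xs.filter (fun x => L.any (fun y => pvCross x y)) := by
  induction xs with
  | nil => rfl
  | cons x t ih =>
    simp only [kiPhase1, kiInner_eq_any, List.filter_cons]
    split <;> simp_all

theorem kiCount_eq_countP (k : List Int) (ys : List (List Int)) :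
    kiCount k ys = (ys.countP (fun y => y ≠ k && pvXorIn k y) : Int) := by
  induction ys with
  | nil => rfl
  | cons y t ih =>
    simp only [kiCount, List.countP_cons]
    by_cases hk : k = y
    · subst hk; simpa using ih
    · have hk' : ¬ y = k := fun h => hk h.symm
      simp only [if_neg hk]
      by_cases h1 : pvEl k 0 < pvEl y 0 ∧ pvEl y 0 < pvEl k 1 <;>
        by_cases h2 : pvEl k 0 < pvEl y 1 ∧ pvEl y 1 < pvEl k 1 <;>
          simp [pvXorIn, h1, h2, hk', ih] <;> omega

theorem kiPhase2_eq_map (knots xs : List (List Int)) :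
    kiPhase2 knots xs = xs.map (fun k => kiCount k knots) := by
  induction xs with
  | nil => rfl
  | cons k t ih => simp [kiPhase2, ih]

-- every knot A selects is a proper interval: its start is strictly below its end
theorem knot_proper (L : List (List Int)) (k : List Int)
    (hk : k ∈ kiPhase1 L L) : pvEl k 0 < pvEl k 1 := by
  rw [kiPhase1_eq_filter, List.mem_filter] at hk
  obtain ⟨-, hany⟩ := hk
  rw [List.any_eq_true] at hany
  obtain ⟨y, -, hy⟩ := hany
  simp only [pvCross, decide_eq_true_eq] at hy
  omega

-- ---- sorted-list counting facts ----
-- positions below countP (< v) are exactly the elements < v of a sorted list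
theorem sorted_getElem_lt_iff (keys : List Int)
    (hs : keys.Pairwise (· ≤ ·)) (v : Int) (i : Nat) (hi : i < keys.length) :
    keys[i] < v ↔ i < keys.countP (fun k => decide (k < v)) := by
  induction keys generalizing i with
  | nil => simp at hi
  | cons a t ih =>
    rw [List.pairwise_cons] at hs
    obtain ⟨ha, ht⟩ := hs
    rcases i with _ | j
    · simp only [List.getElem_cons_zero, List.countP_cons]
      constructor
      · intro h; have hd : decide (a < v) = true := by simpa using h
        simp [hd]
      · intro h
        by_cases hav : a < v
        · exact hav
        · have h0 : t.countP (fun k => decide (k < v)) = 0 := by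
            rw [List.countP_eq_zero]
            intro b hb
            have := ha b hb
            simp only [decide_eq_true_eq]; omega
          simp [hav, h0] at h
    · simp only [List.getElem_cons_succ, List.countP_cons]
      have hj : j < t.length := by simpa using hi
      rw [ih ht j hj]
      by_cases hav : a < v
      · simp [hav]
      · have h0 : t.countP (fun k => decide (k < v)) = 0 := by
          rw [List.countP_eq_zero]
          intro b hb
          have := ha b hb
          simp only [decide_eq_true_eq]; omega
        simp [hav, h0]

-- the hand-written binary search returns countP (< v) on a sorted list
theorem blAux_eq (keys : List Int) (v : Int) (hs : keys.Pairwise (· ≤ ·))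
    (lo hi : Nat) (hhi : hi ≤ keys.length)
    (h1 : lo ≤ keys.countP (fun k => decide (k < v)))
    (h2 : keys.countP (fun k => decide (k < v)) ≤ hi) :
    blAux keys v lo hi = keys.countP (fun k => decide (k < v)) := by
  fun_induction blAux keys v lo hi with
  | case1 lo hi hlt mid hmidlt ih =>
    have hmid : mid < keys.length := by omega
    rw [List.getD_eq_getElem keys 0 hmid] at hmidlt
    have := (sorted_getElem_lt_iff keys hs v mid hmid).mp hmidlt
    exact ih hhi (by omega) h2
  | case2 lo hi hlt mid hmidge ih =>
    have hmid : mid < keys.length := by omega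
    rw [List.getD_eq_getElem keys 0 hmid] at hmidge
    have : ¬ mid < keys.countP (fun k => decide (k < v)) := by
      intro hc
      exact hmidge ((sorted_getElem_lt_iff keys hs v mid hmid).mpr hc)
    exact ih (by omega) h1 (by omega)
  | case3 lo hi hge => omega

theorem bl_eq (keys : List Int) (v : Int) (hs : keys.Pairwise (· ≤ ·)) :
    bl keys v = keys.countP (fun k => decide (k < v)) := by
  exact blAux_eq keys v hs 0 keys.length le_rfl (Nat.zero_le _) List.countP_le_length

-- ---- prefix/suffix of a key-sorted list are filters ----
theorem take_countP_eq_filter {α : Type} (key : α → Int) (s : List α)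
    (hs : s.Pairwise (fun a b => key a ≤ key b)) (b : Int) :
    s.take (s.countP (fun y => decide (key y < b))) = s.filter (fun y => decide (key y < b)) := by
  induction s with
  | nil => rfl
  | cons x t ih =>
    rw [List.pairwise_cons] at hs
    obtain ⟨hx, ht⟩ := hs
    by_cases hxb : key x < b
    · simp only [List.countP_cons, List.filter_cons, hxb, decide_true, if_pos]
      rw [List.take_succ_cons, ih ht]
    · have h0 : t.countP (fun y => decide (key y < b)) = 0 := by
        rw [List.countP_eq_zero]
        intro y hy
        have := hx y hy
        simp only [decide_eq_true_eq]; omega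
      have hf : t.filter (fun y => decide (key y < b)) = [] := by
        rw [List.filter_eq_nil_iff]
        intro y hy
        have := hx y hy
        simp only [decide_eq_true_eq]; omega
      simp [hxb, h0, hf]

theorem drop_countP_eq_filter {α : Type} (key : α → Int) (s : List α)
    (hs : s.Pairwise (fun a b => key a ≤ key b)) (a : Int) :
    s.drop (s.countP (fun y => decide (key y < a))) = s.filter (fun y => decide (a ≤ key y)) := by
  induction s with
  | nil => rfl
  | cons x t ih =>
    rw [List.pairwise_cons] at hs
    obtain ⟨hx, ht⟩ := hs
    by_cases hxa : key x < a
    · have hd : (decide (a ≤ key x)) = false := by simp only [decide_eq_false_iff_not]; omega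
      simp only [List.countP_cons, List.filter_cons, hxa, decide_true, if_pos, hd,
        Bool.false_eq_true, if_neg, if_false]
      rw [List.drop_succ_cons, ih ht]
    · have h0 : t.countP (fun y => decide (key y < a)) = 0 := by
        rw [List.countP_eq_zero]
        intro y hy
        have := hx y hy
        simp only [decide_eq_true_eq]; omega
      have hf : t.filter (fun y => decide (a ≤ key y)) = t := by
        rw [List.filter_eq_self]
        intro y hy
        have := hx y hy
        simp only [decide_eq_true_eq]; omega
      have hd : (decide (a ≤ key x)) = true := by simp only [decide_eq_true_eq]; omega
      simp [hxa, h0, hf, hd]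

-- the [bisect a : bisect b] window of a key-sorted list is the a ≤ key < b filter
theorem window_eq_filter {α : Type} (key : α → Int) (s : List α)
    (hs : s.Pairwise (fun a b => key a ≤ key b)) (a b : Int) :
    (s.drop (s.countP (fun y => decide (key y < a)))).take
        (s.countP (fun y => decide (key y < b)) - s.countP (fun y => decide (key y < a)))
      = s.filter (fun y => decide (a ≤ key y ∧ key y < b)) := by
  rw [← List.drop_take]
  by_cases hab : a ≤ b
  · rw [take_countP_eq_filter key s hs b]
    have hca : s.countP (fun y => decide (key y < a)) =
        (s.filter (fun y => decide (key y < b))).countP (fun y => decide (key y < a)) := by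
      rw [List.countP_filter]
      refine (List.countP_congr ?_).symm
      intro y _
      simp only [Bool.and_eq_true, decide_eq_true_eq]
      omega
    rw [hca, drop_countP_eq_filter key _ (hs.filter _) a, List.filter_filter]
    refine List.filter_congr ?_
    intro y _
    by_cases h1 : a ≤ key y <;> by_cases h2 : key y < b <;> simp [h1, h2]
  · have hle : s.countP (fun y => decide (key y < b)) ≤
        s.countP (fun y => decide (key y < a)) := by
      refine List.countP_mono_left ?_
      intro y _
      simp only [decide_eq_true_eq]; omega
    have h1 : (s.take (s.countP (fun y => decide (key y < b)))).drop
        (s.countP (fun y => decide (key y < a))) = [] := by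
      apply List.drop_eq_nil_of_le
      calc (s.take (s.countP (fun y => decide (key y < b)))).length
          ≤ s.countP (fun y => decide (key y < b)) := by simp
        _ ≤ _ := hle
    rw [h1]
    symm
    rw [List.filter_eq_nil_iff]
    intro y _
    simp only [decide_eq_true_eq]; omega

-- countP of a half-open range is the difference of two prefix counts
theorem countP_range_split {α : Type} (key : α → Int) (s : List α) (a b : Int) (hab : a ≤ b) :
    s.countP (fun y => decide (key y < b)) =
      s.countP (fun y => decide (key y < a)) + s.countP (fun y => decide (a ≤ key y ∧ key y < b)) := by
  induction s with
  | nil => rfl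
  | cons x t ih =>
    simp only [List.countP_cons, ih]
    by_cases h3 : a ≤ key x ∧ key x < b
    · have e3 : decide (a ≤ key x ∧ key x < b) = true := by simpa using h3
      have e1 : decide (key x < b) = true := by simp [h3.2]
      have e2 : decide (key x < a) = false := by simp only [decide_eq_false_iff_not]; omega
      rw [e1, e2, e3]; simp <;> omega
    · have e3 : decide (a ≤ key x ∧ key x < b) = false := by simpa using h3
      rw [e3]
      by_cases h1 : key x < b
      · have e1 : decide (key x < b) = true := by simpa using h1
        have e2 : decide (key x < a) = true := by
          simp only [decide_eq_true_eq]
          rcases not_and_or.mp h3 with h | h <;> omega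
        rw [e1, e2]; simp <;> omega
      · have e1 : decide (key x < b) = false := by simpa using h1
        have e2 : decide (key x < a) = false := by simp only [decide_eq_false_iff_not]; omega
        rw [e1, e2]; simp <;> omega

-- 0/1-XOR counting: |{y : p ≠ q}| = |p| + |q| - 2|p ∧ q| over the integers
theorem countP_xor_split {α : Type} (l : List α) (p q : α → Bool) :
    (l.countP (fun y => p y != q y) : Int) =
      (l.countP p : Int) + (l.countP q : Int) - 2 * (l.countP (fun y => p y && q y) : Int) := by
  induction l with
  | nil => simp
  | cons x t ih =>
    simp only [List.countP_cons]
    cases hp : p x <;> cases hq : q x <;> push_cast <;> simp <;> omega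

-- ---- the two ports agree ----
theorem any_window (xs : List (Int × Int)) (a b : Int) (p : Int × Int → Bool) :
    ((PySem.List.slice (PySem.List.sorted xs Prod.fst false)
        (some ((bl ((PySem.List.sorted xs Prod.fst false).map Prod.fst) a : Nat) : Int))
        (some ((bl ((PySem.List.sorted xs Prod.fst false).map Prod.fst) b : Nat) : Int))).any p)
      = xs.any (fun y => decide (a ≤ y.1 ∧ y.1 < b) && p y) := by
  have hmap := PySem.List.sorted_map_key_pairwise xs Prod.fst
  have hpair : (PySem.List.sorted xs Prod.fst false).Pairwise (fun u v => u.1 ≤ v.1) :=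
    List.pairwise_map.mp hmap
  have hbl : ∀ v : Int, bl ((PySem.List.sorted xs Prod.fst false).map Prod.fst) v
      = (PySem.List.sorted xs Prod.fst false).countP (fun y => decide (y.1 < v)) := by
    intro v
    rw [bl_eq _ _ hmap, List.countP_map]
    rfl
  rw [hbl, hbl, PySem.List.slice_natCast,
    window_eq_filter Prod.fst _ hpair a b, List.any_filter,
    (PySem.List.sorted_perm xs Prod.fst false).any_eq]

theorem countP_window (xs : List (Int × Int)) (a b : Int) (p : Int × Int → Bool) :
    ((PySem.List.slice (PySem.List.sorted xs Prod.fst false)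
        (some ((bl ((PySem.List.sorted xs Prod.fst false).map Prod.fst) a : Nat) : Int))
        (some ((bl ((PySem.List.sorted xs Prod.fst false).map Prod.fst) b : Nat) : Int))).countP p)
      = xs.countP (fun y => decide (a ≤ y.1 ∧ y.1 < b) && p y) := by
  have hmap := PySem.List.sorted_map_key_pairwise xs Prod.fst
  have hpair : (PySem.List.sorted xs Prod.fst false).Pairwise (fun u v => u.1 ≤ v.1) :=
    List.pairwise_map.mp hmap
  have hbl : ∀ v : Int, bl ((PySem.List.sorted xs Prod.fst false).map Prod.fst) v
      = (PySem.List.sorted xs Prod.fst false).countP (fun y => decide (y.1 < v)) := by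
    intro v
    rw [bl_eq _ _ hmap, List.countP_map]
    rfl
  rw [hbl, hbl, PySem.List.slice_natCast,
    window_eq_filter Prod.fst _ hpair a b, List.countP_filter,
    (PySem.List.sorted_perm xs Prod.fst false).countP_eq]
  refine List.countP_congr ?_
  intro y _
  simp [Bool.and_comm]

-- the bisect difference counts the keys in [a, b)

theorem bl_sub_pairs (xs : List (Int × Int)) (a b : Int) (hab : a ≤ b) :
    ((bl ((PySem.List.sorted xs Prod.fst false).map Prod.fst) b : Nat) : Int)
      - ((bl ((PySem.List.sorted xs Prod.fst false).map Prod.fst) a : Nat) : Int)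
      = (xs.countP (fun y => decide (a ≤ y.1 ∧ y.1 < b)) : Nat) := by
  have hmap := PySem.List.sorted_map_key_pairwise xs Prod.fst
  have hpair : (PySem.List.sorted xs Prod.fst false).Pairwise (fun u v => u.1 ≤ v.1) :=
    List.pairwise_map.mp hmap
  have hbl : ∀ v : Int, bl ((PySem.List.sorted xs Prod.fst false).map Prod.fst) v
      = (PySem.List.sorted xs Prod.fst false).countP (fun y => decide (y.1 < v)) := by
    intro v
    rw [bl_eq _ _ hmap, List.countP_map]
    rfl
  rw [hbl, hbl, countP_range_split Prod.fst _ a b hab]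
  simp only [List.Perm.countP_eq _ (PySem.List.sorted_perm xs Prod.fst false)]
  push_cast
  ring

theorem bl_sub_id (xs : List Int) (a b : Int) (hab : a ≤ b) :
    ((bl (PySem.List.sorted xs (fun e => e) false) b : Nat) : Int)
      - ((bl (PySem.List.sorted xs (fun e => e) false) a : Nat) : Int)
      = (xs.countP (fun y => decide (a ≤ y ∧ y < b)) : Nat) := by
  have hpair : (PySem.List.sorted xs (fun e => e) false).Pairwise (· ≤ ·) :=
    PySem.List.sorted_pairwise xs (fun e => e)
  rw [bl_eq _ _ hpair, bl_eq _ _ hpair, countP_range_split (fun e => e) _ a b hab]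
  simp only [List.Perm.countP_eq _ (PySem.List.sorted_perm xs (fun e => e) false)]
  push_cast
  ring

theorem isKnotB_eq (L : List (List Int)) (x : List Int) :
    isKnotB (PySem.List.sorted (toSE L) Prod.fst false) (PySem.List.sorted (toES L) Prod.fst false)
      ((PySem.List.sorted (toSE L) Prod.fst false).map Prod.fst)
      ((PySem.List.sorted (toES L) Prod.fst false).map Prod.fst) x
    = L.any (fun y => pvCross x y) := by
  simp only [isKnotB]
  rw [any_window (toES L), any_window (toSE L)]
  unfold toSE toES
  rw [List.any_map, List.any_map]
  rw [Bool.eq_iff_iff]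
  simp only [Bool.or_eq_true, List.any_eq_true, Function.comp, Bool.and_eq_true,
    decide_eq_true_eq, pvCross]
  constructor
  · rintro (⟨y, hy, h⟩ | ⟨y, hy, h⟩) <;> exact ⟨y, hy, by omega⟩
  · rintro ⟨y, hy, h⟩
    rcases h with h | h
    · exact Or.inl ⟨y, hy, by omega⟩
    · exact Or.inr ⟨y, hy, by omega⟩

theorem countB_eq (knots : List (List Int)) (k : List Int)
    (hk : pvEl k 0 < pvEl k 1) :
    countB (PySem.List.sorted (toSE knots) Prod.fst false)
      ((PySem.List.sorted (toSE knots) Prod.fst false).map Prod.fst)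
      (PySem.List.sorted (knots.map (fun h => pvEl h 1)) (fun e => e) false) k
    = kiCount k knots := by
  have hab : pvEl k 0 + 1 ≤ pvEl k 1 := by omega
  rw [kiCount_eq_countP]
  have hxor : knots.countP (fun y => y ≠ k && pvXorIn k y)
      = knots.countP (fun y => pvXorIn k y) := by
    refine List.countP_congr ?_
    intro y _
    by_cases hyk : y = k
    · subst hyk
      simp [pvXorIn]
    · simp [hyk]
  rw [hxor]
  simp only [countB]
  rw [bl_sub_pairs (toSE knots) _ _ hab,
      bl_sub_id (knots.map (fun h => pvEl h 1)) _ _ hab,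
      countP_window (toSE knots) _ _ _]
  unfold toSE
  rw [List.countP_map, List.countP_map, List.countP_map]
  simp only [pvXorIn]
  rw [countP_xor_split knots
        (fun y => decide (pvEl k 0 < pvEl y 0 ∧ pvEl y 0 < pvEl k 1))
        (fun y => decide (pvEl k 0 < pvEl y 1 ∧ pvEl y 1 < pvEl k 1))]
  have e1 : knots.countP ((fun y => decide (pvEl k 0 + 1 ≤ y.1 ∧ y.1 < pvEl k 1)) ∘
        (fun h => (pvEl h 0, pvEl h 1)))
      = knots.countP (fun y => decide (pvEl k 0 < pvEl y 0 ∧ pvEl y 0 < pvEl k 1)) := by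
    refine List.countP_congr ?_
    intro y _
    simp only [Function.comp, decide_eq_true_eq]
    omega
  have e2 : knots.countP ((fun y => decide (pvEl k 0 + 1 ≤ y ∧ y < pvEl k 1)) ∘
        (fun h => pvEl h 1))
      = knots.countP (fun y => decide (pvEl k 0 < pvEl y 1 ∧ pvEl y 1 < pvEl k 1)) := by
    refine List.countP_congr ?_
    intro y _
    simp only [Function.comp, decide_eq_true_eq]
    omega
  have e3 : knots.countP ((fun y => decide (pvEl k 0 + 1 ≤ y.1 ∧ y.1 < pvEl k 1) &&
        decide (pvEl k 0 < y.2 ∧ y.2 < pvEl k 1)) ∘ (fun h => (pvEl h 0, pvEl h 1)))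
      = knots.countP (fun y => decide (pvEl k 0 < pvEl y 0 ∧ pvEl y 0 < pvEl k 1) &&
        decide (pvEl k 0 < pvEl y 1 ∧ pvEl y 1 < pvEl k 1)) := by
    refine List.countP_congr ?_
    intro y _
    simp only [Function.comp, Bool.and_eq_true, decide_eq_true_eq]
    constructor <;> intro h <;> exact ⟨by omega, by omega⟩
  rw [e1, e2, e3]

-- ===== VERDICT (by name: the statement is the Claim_ definition above) =====
theorem knotintersection_spec : Claim_equal_knotintersection := by
  intro L _ _
  unfold Spec_knotintersection knotintersection knotintersection_alt
  have hknots : L.filter (isKnotB (PySem.List.sorted (toSE L) Prod.fst false)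
      (PySem.List.sorted (toES L) Prod.fst false)
      ((PySem.List.sorted (toSE L) Prod.fst false).map Prod.fst)
      ((PySem.List.sorted (toES L) Prod.fst false).map Prod.fst)) = kiPhase1 L L := by
    rw [kiPhase1_eq_filter]
    exact List.filter_congr (fun x _ => isKnotB_eq L x)
  simp only [hknots, kiPhase2_eq_map]
  refine Prod.ext rfl ?_
  simp only
  refine List.map_congr_left ?_
  intro k hk
  exact (countB_eq (kiPhase1 L L) k (knot_proper L k hk)).symm
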